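-- pv_equiv track=rewrite | github.com/zalio/word-problem-solver-thesis | number_assigners/type9_num_assigner.py | assign_n3_according_to_sum_word
-- ===== SOURCE A (Python) =====
-- def assign_n3_according_to_sum_word(prioritized_numbers, original_question):
--     original_split = original_question.replace('. ', ' ').replace('?', '').replace(',', '').split()
--     if "sum" not in original_split:
--         return ""
--     has_passed_beyond_word_sum = False
--     n3 = ""
--     for i in original_split:
--         if i == "sum":
--             has_passed_beyond_word_sum = True
--         if i in prioritized_numbers and has_passed_beyond_word_sum:
--             n3 = i
--             break
--     return n3
-- ===== SOURCE B (Python) =====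
-- def assign_n3_according_to_sum_word(prioritized_numbers, original_question):
--     split = original_question.replace('. ', ' ').replace('?', '').replace(',', '').split()
--     if "sum" not in split:
--         return ""
--     tail = split[split.index("sum"):]
--     best = min((tail.index(w) for w in prioritized_numbers if w in tail), default=None)
--     return tail[best] if best is not None else ""
-- ===== Notes on version B (the rewrite author's own statement) =====
-- stated objective: alternative
-- what changed: Inverts the iteration: instead of scanning the words with a latching flag and testing each against prioritized_numbers, B slices the tail at the first 'sum' once, computes for each prioritized number its first position in that tail, takes the minimum position, and returns the token there.
import Mathlib
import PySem

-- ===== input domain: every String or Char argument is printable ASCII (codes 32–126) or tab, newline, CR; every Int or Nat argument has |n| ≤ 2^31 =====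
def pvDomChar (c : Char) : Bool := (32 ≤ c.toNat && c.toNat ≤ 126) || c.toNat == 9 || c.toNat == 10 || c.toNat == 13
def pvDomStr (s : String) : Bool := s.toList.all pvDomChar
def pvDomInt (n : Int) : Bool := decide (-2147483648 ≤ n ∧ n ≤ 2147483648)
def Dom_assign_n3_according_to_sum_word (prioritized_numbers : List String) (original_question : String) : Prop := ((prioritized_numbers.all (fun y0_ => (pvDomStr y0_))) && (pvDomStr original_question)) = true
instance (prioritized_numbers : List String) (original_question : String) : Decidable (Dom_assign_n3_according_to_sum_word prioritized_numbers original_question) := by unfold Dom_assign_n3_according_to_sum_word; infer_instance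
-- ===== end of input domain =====

-- B inverts the iteration: it slices the tail at the first "sum", computes each prioritized
-- number's first position in that tail, and returns the token at the minimal position ("alternative").

-- ===== PORT A =====
-- the for-loop of A: state = (has_passed_beyond_word_sum, n3); break returns i immediately
def pvLoopA (prioritized_numbers : List String) : List String → Bool → String → String
  | [], _, n3 => n3
  | i :: rest, flag, n3 =>
    let flag' := if i == "sum" then true else flag
    if prioritized_numbers.contains i && flag' then i
    else pvLoopA prioritized_numbers rest flag' n3

def assign_n3_according_to_sum_word (prioritized_numbers : List String) (original_question : String) : String :=
  let original_split := PySem.Str.split₀ (PySem.Str.replace (PySem.Str.replace (PySem.Str.replace original_question ". " " ") "?" "") "," "")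
  if ¬ original_split.contains "sum" then ""
  else pvLoopA prioritized_numbers original_split false ""

-- ===== PORT B =====
-- min((tail.index(w) for w in prioritized_numbers if w in tail), default=None)
def pvBest (tail : List String) (pn : List String) : Option Nat :=
  pn.foldl (fun acc w =>
    match PySem.List.index? tail w with
    | none => acc
    | some i => match acc with
      | none => some i
      | some j => some (min j i)) none

def assign_n3_according_to_sum_word_alt (prioritized_numbers : List String) (original_question : String) : String :=
  let split := PySem.Str.split₀ (PySem.Str.replace (PySem.Str.replace (PySem.Str.replace original_question ". " " ") "?" "") "," "")
  if ¬ split.contains "sum" then ""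
  else
    match PySem.List.index? split "sum" with
    | none => ""  -- unreachable: "sum" ∈ split here (python's split.index cannot raise)
    | some idx =>
      let tail := PySem.List.slice split (some (idx : Int)) none
      match pvBest tail prioritized_numbers with
      | none => ""
      | some k => tail.getD k ""  -- tail[best]; k < tail.length by construction

-- ===== PRECONDITION & SPEC =====
def Spec_assign_n3_according_to_sum_word (prioritized_numbers : List String) (original_question : String) (out : String) : Prop := out = assign_n3_according_to_sum_word_alt prioritized_numbers original_question
instance (prioritized_numbers : List String) (original_question : String) (out : String) : Decidable (Spec_assign_n3_according_to_sum_word prioritized_numbers original_question out) := by unfold Spec_assign_n3_according_to_sum_word; infer_instance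

-- ===== CLAIM (what is proved, stated in full; the proofs are below) =====
def Claim_equal_assign_n3_according_to_sum_word : Prop := ∀ (prioritized_numbers : List String) (original_question : String), Dom_assign_n3_according_to_sum_word prioritized_numbers original_question → Spec_assign_n3_according_to_sum_word prioritized_numbers original_question (assign_n3_according_to_sum_word prioritized_numbers original_question)

-- ===== LEMMAS AND PROOFS =====

-- once the flag is true, A's loop is exactly "first prioritized element, default ''"
theorem pvLoopA_true (pn : List String) (l : List String) :
    pvLoopA pn l true "" = (l.find? (fun w => pn.contains w)).getD "" := by
  induction l with
  | nil => rfl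
  | cons i rest ih =>
    simp only [pvLoopA, List.find?]
    by_cases h : i ∈ pn
    · simp [h]
    · simp [h, ih]

-- while the flag is false and no "sum" has been seen, A's loop skips
theorem pvLoopA_skip (pn : List String) (pre tl : List String) (h : "sum" ∉ pre) :
    pvLoopA pn (pre ++ tl) false "" = pvLoopA pn tl false "" := by
  induction pre with
  | nil => rfl
  | cons i rest ih =>
    have hi : i ≠ "sum" := fun he => h (he ▸ List.mem_cons_self)
    have hr : "sum" ∉ rest := fun hm => h (List.mem_cons_of_mem _ hm)
    simp only [List.cons_append, pvLoopA, hi, beq_iff_eq, Bool.and_false, if_false]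
    exact ih hr

-- at the "sum" element the flag latches in the same iteration
theorem pvLoopA_sum (pn : List String) (tl : List String) :
    pvLoopA pn ("sum" :: tl) false "" = (("sum" :: tl).find? (fun w => pn.contains w)).getD "" := by
  have : pvLoopA pn ("sum" :: tl) false "" = pvLoopA pn ("sum" :: tl) true "" := by
    simp [pvLoopA]
  rw [this, pvLoopA_true]

-- the step function of pvBest's fold
def pvStep (tail : List String) (acc : Option Nat) (w : String) : Option Nat :=
  match PySem.List.index? tail w with
  | none => acc
  | some i => match acc with
    | none => some i
    | some j => some (min j i)

def pvOMin : Option Nat → Option Nat → Option Nat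
  | none, b => b
  | some j, none => some j
  | some j, some i => some (min j i)

theorem pvBest_eq_foldl (tail pn : List String) :
    pvBest tail pn = pn.foldl (pvStep tail) none := rfl

theorem foldl_pvStep_acc (tail pn : List String) (acc : Option Nat) :
    pn.foldl (pvStep tail) acc = pvOMin acc (pn.foldl (pvStep tail) none) := by
  induction pn generalizing acc with
  | nil => cases acc <;> rfl
  | cons w rest ih =>
    simp only [List.foldl]
    rw [ih, ih (pvStep tail none w)]
    cases hidx : PySem.List.index? tail w with
    | none =>
      simp only [pvStep, hidx]
      cases acc <;> rfl
    | some i =>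
      cases acc with
      | none => rfl
      | some j =>
        simp only [pvStep, hidx]
        cases h : rest.foldl (pvStep tail) none with
        | none => simp [pvOMin]
        | some m => simp [pvOMin, min_assoc]

-- pvBest = none ↔ no prioritized word occurs in the tail
theorem pvBest_none (tail pn : List String) (h : pvBest tail pn = none) :
    ∀ w ∈ pn, PySem.List.index? tail w = none := by
  induction pn with
  | nil => intro w hw; cases hw
  | cons x rest ih =>
    rw [pvBest_eq_foldl, List.foldl, foldl_pvStep_acc] at h
    have hrest : rest.foldl (pvStep tail) none = none := by
      cases hr : rest.foldl (pvStep tail) none with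
      | none => rfl
      | some m =>
        rw [hr] at h; exfalso
        cases hs : pvStep tail none x <;> rw [hs] at h <;> simp [pvOMin] at h
    rw [hrest] at h
    have hx : PySem.List.index? tail x = none := by
      cases hx : PySem.List.index? tail x with
      | none => rfl
      | some i => exfalso; simp only [pvStep, hx] at h; simp [pvOMin] at h
    intro w hw
    rcases List.mem_cons.1 hw with rfl | hm
    · exact hx
    · exact ih (by rw [pvBest_eq_foldl, hrest]) w hm

-- pvBest = some i: it is attained and it is a lower bound
theorem pvBest_some (tail pn : List String) (i : Nat) (h : pvBest tail pn = some i) :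
    (∃ w ∈ pn, PySem.List.index? tail w = some i) ∧
    (∀ w ∈ pn, ∀ j, PySem.List.index? tail w = some j → i ≤ j) := by
  induction pn generalizing i with
  | nil => cases h
  | cons x rest ih =>
    rw [pvBest_eq_foldl, List.foldl, foldl_pvStep_acc] at h
    cases hx : PySem.List.index? tail x with
    | none =>
      simp only [pvStep, hx, pvOMin] at h
      have h' : pvBest tail rest = some i := by rw [pvBest_eq_foldl]; exact h
      obtain ⟨⟨w, hw, hwi⟩, hlb⟩ := ih i h'
      refine ⟨⟨w, List.mem_cons_of_mem _ hw, hwi⟩, ?_⟩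
      intro v hv j hvj
      rcases List.mem_cons.1 hv with rfl | hm
      · rw [hx] at hvj; cases hvj
      · exact hlb v hm j hvj
    | some a =>
      simp only [pvStep, hx] at h
      cases hr : rest.foldl (pvStep tail) none with
      | none =>
        rw [hr] at h; simp only [pvOMin] at h
        obtain rfl : a = i := by injection h
        refine ⟨⟨x, List.mem_cons_self, hx⟩, ?_⟩
        intro v hv j hvj
        rcases List.mem_cons.1 hv with rfl | hm
        · rw [hx] at hvj; injection hvj with hh; omega
        · exact absurd hvj (by rw [pvBest_none tail rest (by rw [pvBest_eq_foldl]; exact hr) v hm]; simp)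
      | some m =>
        rw [hr] at h; simp only [pvOMin] at h
        obtain rfl : min a m = i := by injection h
        obtain ⟨⟨w, hw, hwm⟩, hlb⟩ := ih m (by rw [pvBest_eq_foldl]; exact hr)
        constructor
        · by_cases ham : a ≤ m
          · exact ⟨x, List.mem_cons_self, by rwa [Nat.min_eq_left ham]⟩
          · exact ⟨w, List.mem_cons_of_mem _ hw, by rwa [Nat.min_eq_right (by omega)]⟩
        · intro v hv j hvj
          rcases List.mem_cons.1 hv with rfl | hm
          · rw [hx] at hvj; injection hvj with hh; omega
          · have := hlb v hm j hvj; omega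

-- the first occurrence index of any witnessed element is ≤ that position
theorem index?_le_of_getElem (tail : List String) (j : Nat) (hj : j < tail.length)
    (v : String) (hv : tail[j] = v) :
    ∃ j', PySem.List.index? tail v = some j' ∧ j' ≤ j := by
  have hmem : v ∈ tail := hv ▸ List.getElem_mem hj
  obtain ⟨j', hj'⟩ := Option.isSome_iff_exists.mp ((PySem.List.index?_isSome_iff tail v).2 hmem)
  refine ⟨j', hj', ?_⟩
  by_contra hlt
  obtain ⟨hk, _, hmin⟩ := PySem.List.getElem_of_index?_eq_some hj'
  exact hmin j (by omega) hv

-- first prioritized word in tail = token at pvBest's minimal position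
theorem find?_eq_best (tail pn : List String) :
    (tail.find? (fun w => pn.contains w)).getD ""
      = match pvBest tail pn with
        | none => ""
        | some k => tail.getD k "" := by
  cases hb : pvBest tail pn with
  | none =>
    have hnone : tail.find? (fun w => pn.contains w) = none := by
      rw [List.find?_eq_none]
      intro x hx hpx
      have hvx : x ∈ pn := by simpa using hpx
      have : PySem.List.index? tail x = none := pvBest_none tail pn hb x hvx
      exact absurd hx ((PySem.List.index?_eq_none_iff tail x).1 this)
    rw [hnone]; rfl
  | some k =>
    obtain ⟨⟨w, hw, hwk⟩, hlb⟩ := pvBest_some tail pn k hb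
    obtain ⟨hk, hget, _⟩ := PySem.List.getElem_of_index?_eq_some hwk
    have hfind : tail.find? (fun w => pn.contains w) = some w := by
      rw [List.find?_eq_some_iff_getElem]
      refine ⟨by simpa using hw, k, hk, hget, ?_⟩
      intro j hj
      simp only [Bool.not_eq_true', List.contains_eq_mem, decide_eq_false_iff_not]
      intro hvj
      obtain ⟨j', hj', hle⟩ := index?_le_of_getElem tail j (by omega) tail[j] rfl
      have := hlb _ hvj j' hj'
      omega
    rw [hfind]
    simp [List.getD, List.getElem?_eq_getElem hk, hget]

-- ===== VERDICT (by name: the statement is the Claim_ definition above) =====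
theorem assign_n3_according_to_sum_word_spec : Claim_equal_assign_n3_according_to_sum_word := by
  unfold Claim_equal_assign_n3_according_to_sum_word
  intro pn q _
  unfold Spec_assign_n3_according_to_sum_word assign_n3_according_to_sum_word assign_n3_according_to_sum_word_alt
  dsimp only
  set l := PySem.Str.split₀ (PySem.Str.replace (PySem.Str.replace (PySem.Str.replace q ". " " ") "?" "") "," "") with hl
  by_cases hmem : "sum" ∈ l
  · obtain ⟨k, hk⟩ : ∃ k, PySem.List.index? l "sum" = some k := by
      exact Option.isSome_iff_exists.mp ((PySem.List.index?_isSome_iff l "sum").2 hmem)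
    obtain ⟨pre, suf, hsplit, hlen, hpre⟩ := (PySem.List.index?_eq_some_iff l "sum" k).1 hk
    rw [hk, if_neg (by simp [hmem]), if_neg (by simp [hmem])]
    dsimp only
    rw [PySem.List.slice_from_natCast]
    subst hlen
    rw [hsplit, List.drop_left, pvLoopA_skip pn pre _ hpre, pvLoopA_sum, find?_eq_best]
  · rw [if_pos (by simpa using hmem), if_pos (by simpa using hmem)]
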